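-- pv_equiv track=rewrite | github.com/DarkThom/Mathematical-Projects | 201yams/core.py | get_n_and_p
-- ===== SOURCE A (Python) =====
-- def get_n_and_p(dices, asked, tabs=False):
-- 	""" Function to get n (number of dices missing)
-- 	and p (number of relance) """
-- 	p = 0
-- 	for value in dices:
-- 		if value in asked.keys() and asked[value] > 0:
-- 			asked[value] -= 1
-- 		else:
-- 			p += 1
-- 	if not tabs:
-- 		n = sum(asked.values())
-- 	else:
-- 		n = asked
-- 	return n, p
-- ===== SOURCE B (Python) =====
-- def get_n_and_p(dices, asked, tabs=False):
-- 	""" Group the dice into a frequency table, then consume asked's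
-- 	capacity key by key (equivalence is about the return value;
-- 	asked is mutated to the same final dict as the original). """
-- 	freq = {}
-- 	for d in dices:
-- 		freq[d] = freq.get(d, 0) + 1
-- 	matched = 0
-- 	for k, a in list(asked.items()):
-- 		m = min(freq.get(k, 0), a if a > 0 else 0)
-- 		asked[k] = a - m
-- 		matched += m
-- 	p = len(dices) - matched
-- 	n = sum(asked.values()) if not tabs else asked
-- 	return n, p
-- ===== Notes on version B (the rewrite author's own statement) =====
-- stated objective: alternative
-- what changed: Instead of streaming die by die and decrementing asked one unit at a time, B builds a frequency table of the dice once and then makes a single pass over asked's entries, matching min(count, capacity) per key in one step; p falls out as len(dices) minus total matched.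
-- outside the precondition, e.g. on get_n_and_p([1], {1: 2}, True): A returns ({1: 1}, 0), B returns ({1: 1}, 0)
import Mathlib
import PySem

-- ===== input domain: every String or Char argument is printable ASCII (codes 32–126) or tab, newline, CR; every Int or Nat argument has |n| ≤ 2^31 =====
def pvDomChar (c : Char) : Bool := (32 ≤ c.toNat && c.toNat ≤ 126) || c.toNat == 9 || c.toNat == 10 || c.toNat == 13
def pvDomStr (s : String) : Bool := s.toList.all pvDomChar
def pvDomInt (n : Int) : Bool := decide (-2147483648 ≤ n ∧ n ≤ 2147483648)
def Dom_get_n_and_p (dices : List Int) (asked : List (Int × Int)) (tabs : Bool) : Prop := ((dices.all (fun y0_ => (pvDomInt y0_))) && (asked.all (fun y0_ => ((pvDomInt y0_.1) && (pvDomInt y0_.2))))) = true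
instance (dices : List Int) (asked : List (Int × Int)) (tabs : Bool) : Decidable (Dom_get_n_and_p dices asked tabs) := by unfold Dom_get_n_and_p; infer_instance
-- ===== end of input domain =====

-- B groups the dice into a frequency table and consumes asked's capacity per key in one
-- pass, instead of A's die-by-die streaming decrement (alternative decomposition, same cost;
-- the equivalence proved is about the return value — both Pythons mutate asked identically).


-- ===== PORT A =====
-- for value in dices: if value in asked and asked[value] > 0: asked[value] -= 1 else: p += 1
def get_n_and_p (dices : List Int) (asked : List (Int × Int)) (tabs : Bool) : Int × Int :=
  let st := dices.foldl
    (fun (st : PySem.Dict Int Int × Int) value =>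
      match PySem.Dict.get? st.1 value with
      | some a => if a > 0 then (PySem.Dict.insert st.1 value (a - 1), st.2)
                  else (st.1, st.2 + 1)
      | none => (st.1, st.2 + 1))
    (PySem.Dict.mk asked, 0)
  -- tabs = true returns the dict itself in Python (not an int); excluded by Pre_, 0 here
  if !tabs then ((PySem.Dict.values st.1).sum, st.2) else (0, st.2)

-- ===== PORT B =====
def get_n_and_p_alt (dices : List Int) (asked : List (Int × Int)) (tabs : Bool) : Int × Int :=
  let freq := dices.foldl (fun f d => PySem.Dict.insert f d (PySem.Dict.getD f d 0 + 1))
    PySem.Dict.empty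
  let st := asked.foldl
    (fun (st : List (Int × Int) × Int) ka =>
      let m := min (PySem.Dict.getD freq ka.1 0) (if ka.2 > 0 then ka.2 else 0)
      (st.1 ++ [(ka.1, ka.2 - m)], st.2 + m))
    ([], 0)
  -- tabs = true returns the (updated) dict itself in Python; excluded by Pre_, 0 here
  (if !tabs then (st.1.map (fun ka => ka.2)).sum else 0, (dices.length : Int) - st.2)

-- ===== PRECONDITION & SPEC =====
-- Pre_ excludes tabs = true, where A returns the asked dict itself as n (not a value of the
-- declared Int type), and asked lists with duplicate keys, which cannot arise from a Python dict.
def Pre_get_n_and_p (dices : List Int) (asked : List (Int × Int)) (tabs : Bool) : Prop :=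
  tabs = false ∧ (asked.map Prod.fst).Nodup
instance (dices : List Int) (asked : List (Int × Int)) (tabs : Bool) : Decidable (Pre_get_n_and_p dices asked tabs) := by unfold Pre_get_n_and_p; infer_instance

def pvWitness_get_n_and_p : List Int × (List (Int × Int)) × Bool :=
  ([1, 3, 3, 5], [(3, 2), (5, 0), (2, 1)], false)

def Spec_get_n_and_p (dices : List Int) (asked : List (Int × Int)) (tabs : Bool) (out : Int × Int) : Prop := out = get_n_and_p_alt dices asked tabs
instance (dices : List Int) (asked : List (Int × Int)) (tabs : Bool) (out : Int × Int) : Decidable (Spec_get_n_and_p dices asked tabs out) := by unfold Spec_get_n_and_p; infer_instance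

-- ===== CLAIM (what is proved, stated in full; the proofs are below) =====
def Claim_equal_get_n_and_p : Prop := ∀ (dices : List Int) (asked : List (Int × Int)) (tabs : Bool), Dom_get_n_and_p dices asked tabs → Pre_get_n_and_p dices asked tabs → Spec_get_n_and_p dices asked tabs (get_n_and_p dices asked tabs)

-- ===== LEMMAS AND PROOFS =====

-- per-key number of matched dice: min(count of the key among the dice, capacity max(a,0))
def pvM (ds : List Int) (ka : Int × Int) : Int :=
  min (ds.count ka.1) (if ka.2 > 0 then ka.2 else 0)

-- per-key final value in asked
def pvUpd (ds : List Int) (ka : Int × Int) : Int × Int := (ka.1, ka.2 - pvM ds ka)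

theorem pvA_loop (ds : List Int) (L : List (Int × Int)) (p : Int)
    (h : (L.map Prod.fst).Nodup) :
    ds.foldl
      (fun (st : PySem.Dict Int Int × Int) value =>
        match PySem.Dict.get? st.1 value with
        | some a => if a > 0 then (PySem.Dict.insert st.1 value (a - 1), st.2)
                    else (st.1, st.2 + 1)
        | none => (st.1, st.2 + 1))
      (PySem.Dict.mk L, p)
    = (PySem.Dict.mk (L.map (pvUpd ds)), p + (ds.length : Int) - (L.map (pvM ds)).sum) := by
  induction ds generalizing L p with
  | nil =>
    have h1 : ∀ ka ∈ L, pvUpd [] ka = ka := by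
      rintro ⟨k, a⟩ _
      simp only [pvUpd, pvM, List.count_nil, Nat.cast_zero, Prod.mk.injEq, true_and]
      split_ifs with h <;> omega
    have h2 : (L.map (pvM [])).sum = 0 := by
      apply List.sum_eq_zero
      rintro x hx
      obtain ⟨⟨k, a⟩, _, rfl⟩ := List.mem_map.mp hx
      simp only [pvM, List.count_nil, Nat.cast_zero]
      split_ifs with h <;> omega
    simp [List.map_congr_left h1, h2]
  | cons d ds ih =>
    simp only [List.foldl_cons]
    rcases hget : PySem.Dict.get? (PySem.Dict.mk L) d with _ | a
    · -- d is not a key of asked: p += 1, asked unchanged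
      have hne : ∀ ka ∈ L, ka.1 ≠ d := by
        intro ka hka hkad
        exact ((PySem.Dict.get?_eq_none_iff_not_mem_keys (PySem.Dict.mk L) d).mp hget)
          (hkad ▸ List.mem_map_of_mem hka)
      have hcnt : ∀ ka ∈ L, ((d :: ds).count ka.1 : Int) = (ds.count ka.1 : Int) := by
        intro ka hka
        have : (d == ka.1) = false := by simp [hne ka hka |>.symm]
        simp [List.count_cons, this]
      rw [ih L (p + 1) h]
      refine Prod.ext ?_ ?_
      · simp only
        congr 1
        refine List.map_congr_left (fun ka hka => ?_)
        simp [pvUpd, pvM, hcnt ka hka]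
      · simp only
        have : (L.map (pvM (d :: ds))) = (L.map (pvM ds)) :=
          List.map_congr_left (fun ka hka => by simp [pvM, hcnt ka hka])
        rw [this]
        simp only [List.length_cons]
        push_cast
        ring
    · -- d has an entry (d, a) in asked
      obtain ⟨pr, hfind, hpr2⟩ : ∃ pr, L.find? (fun q => q.1 == d) = some pr ∧ pr.2 = a := by
        simpa [PySem.Dict.get?] using hget
      have hprk : pr.1 = d := by simpa using List.find?_some hfind
      have hmem : (d, a) ∈ L := by
        have := List.mem_of_find?_eq_some hfind
        rwa [show pr = (d, a) from Prod.ext hprk hpr2] at this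
      have huniq : ∀ q ∈ L, q.1 = d → q = (d, a) := fun q hq hqd =>
        List.inj_on_of_nodup_map h hq hmem (by simp [hqd])
      have hcount1 : ((L.map Prod.fst).count d) = 1 :=
        List.count_eq_one_of_mem h (List.mem_map_of_mem hmem)
      by_cases ha : a > 0
      · -- matched: asked[d] -= 1
        have hcontains : (PySem.Dict.mk L).contains d = true := by
          rw [PySem.Dict.contains_eq_isSome_get?, hget]; rfl
        have hins : (PySem.Dict.mk L).insert d (a - 1)
            = PySem.Dict.mk (L.map (fun q => if q.1 == d then (d, a - 1) else q)) := by
          apply PySem.Dict.ext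
          simpa using PySem.Dict.items_insert_of_contains (PySem.Dict.mk L) (a - 1) hcontains
        have hkeys : (L.map (fun q => if q.1 == d then (d, a - 1) else q)).map Prod.fst
            = L.map Prod.fst := by
          rw [List.map_map]
          refine List.map_congr_left (fun q _ => ?_)
          by_cases hqd : q.1 = d <;> simp [hqd]
        simp only [hget, ha, if_pos, ite_true]
        rw [hins, ih _ p (by rw [hkeys]; exact h)]
        have hpoint : ∀ q ∈ L,
            pvUpd ds (if q.1 == d then (d, a - 1) else q) = pvUpd (d :: ds) q := by
          intro q hq
          by_cases hqd : q.1 = d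
          · have hqa := huniq q hq hqd
            subst hqa
            simp only [pvUpd, pvM, beq_self_eq_true, if_true, List.count_cons_self,
              Prod.mk.injEq, true_and]
            push_cast
            split_ifs <;> omega
          · have : (q.1 == d) = false := by simp [hqd]
            simp only [pvUpd, pvM, this, Bool.false_eq_true, if_false]
            have : (d == q.1) = false := by simp only [beq_eq_false_iff_ne]; exact Ne.symm hqd
            simp [List.count_cons, this]
        have hsum : (L.map (pvM (d :: ds))).sum
            = ((L.map (fun q => if q.1 == d then (d, a - 1) else q)).map (pvM ds)).sum + 1 := by
          rw [List.map_map]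
          have : ∀ q ∈ L, pvM (d :: ds) q
              = (pvM ds ∘ fun q => if q.1 == d then (d, a - 1) else q) q
                + (if q.1 == d then 1 else 0) := by
            intro q hq
            by_cases hqd : q.1 = d
            · have hqa := huniq q hq hqd
              subst hqa
              simp only [Function.comp, pvM, beq_self_eq_true, if_true, List.count_cons_self]
              push_cast
              split_ifs <;> omega
            · have h1 : (q.1 == d) = false := by simp [hqd]
              have h2 : (d == q.1) = false := by simp only [beq_eq_false_iff_ne]; exact Ne.symm hqd
              simp [Function.comp, pvM, h1, List.count_cons, h2]
          rw [List.map_congr_left this, PySem.List.sum_map_add_int,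
            PySem.List.sum_map_ite_one_zero]
          have : L.countP (fun q => q.1 == d) = 1 := by
            rw [show (fun (q : Int × Int) => q.1 == d) = ((· == d) ∘ Prod.fst) from rfl,
              ← List.countP_map]
            simpa [List.count] using hcount1
          rw [this]
          push_cast
          ring
        refine Prod.ext ?_ ?_
        · simp only
          congr 1
          rw [List.map_map]
          exact List.map_congr_left hpoint
        · simp only
          rw [hsum]
          simp only [List.length_cons]
          push_cast
          ring
      · -- entry present but capacity exhausted: p += 1
        have hcnt : ∀ q ∈ L, pvM (d :: ds) q = pvM ds q := by
          intro q hq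
          by_cases hqd : q.1 = d
          · have hqa := huniq q hq hqd
            subst hqa
            simp only [pvM, List.count_cons_self]
            push_cast
            split_ifs <;> omega
          · have : (d == q.1) = false := by simp only [beq_eq_false_iff_ne]; exact Ne.symm hqd
            simp [pvM, List.count_cons, this]
        simp only [hget, ha, if_false, ite_false]
        rw [ih L (p + 1) h]
        refine Prod.ext ?_ ?_
        · simp only
          congr 1
          exact List.map_congr_left (fun q hq => by simp [pvUpd, hcnt q hq])
        · simp only
          rw [List.map_congr_left hcnt]
          simp only [List.length_cons]
          push_cast
          ring

theorem pvB_loop (ds : List Int) (L : List (Int × Int)) (acc : List (Int × Int)) (s : Int) :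
    L.foldl
      (fun (st : List (Int × Int) × Int) ka =>
        let m := min (PySem.Dict.getD
          (ds.foldl (fun f d => PySem.Dict.insert f d (PySem.Dict.getD f d 0 + 1)) PySem.Dict.empty)
          ka.1 0) (if ka.2 > 0 then ka.2 else 0)
        (st.1 ++ [(ka.1, ka.2 - m)], st.2 + m))
      (acc, s)
    = (acc ++ L.map (pvUpd ds), s + (L.map (pvM ds)).sum) := by
  induction L generalizing acc s with
  | nil => simp
  | cons ka L ih =>
    simp only [List.foldl_cons]
    rw [ih]
    simp [PySem.Dict.getD_foldl_insert_add_one, pvUpd, pvM]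
    ring

-- ===== VERDICT (by name: the statement is the Claim_ definition above) =====
theorem get_n_and_p_spec : Claim_equal_get_n_and_p := by
  intro dices asked tabs _ hpre
  obtain ⟨htabs, hnd⟩ := hpre
  unfold Spec_get_n_and_p get_n_and_p get_n_and_p_alt
  subst htabs
  dsimp only []
  rw [pvA_loop dices asked 0 hnd, pvB_loop]
  simp [PySem.Dict.values]
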